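-- pv_equiv track=rewrite | github.com/zedarvates/StoryCore-Engine | test_cleanup/value_assessment/unique_coverage.py | get_tests_with_no_unique_coverage
-- ===== SOURCE A (Python) =====
-- from typing import Dict, List, Set
--
-- def _calculate_unique_coverage(
--     test_name: str,
--     test_coverage_map: Dict[str, Dict[str, Set[int]]]
-- ) -> int:
--     """
--     Calculate the number of unique lines covered only by this test.
--
--     Args:
--         test_name: Name of the test to analyze
--         test_coverage_map: Dictionary mapping test names to their coverage data
--
--     Returns:
--         Number of lines uniquely covered by this test
--     """
--     if test_name not in test_coverage_map:
--         return 0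
--
--     test_coverage = test_coverage_map[test_name]
--
--     # Get all lines covered by this test
--     test_lines = set()
--     for file_path, lines in test_coverage.items():
--         for line_num in lines:
--             test_lines.add(f"{file_path}:{line_num}")
--
--     # Get all lines covered by other tests
--     other_lines = set()
--     for other_test, coverage_data in test_coverage_map.items():
--         if other_test != test_name:
--             for file_path, lines in coverage_data.items():
--                 for line_num in lines:
--                     other_lines.add(f"{file_path}:{line_num}")
--
--     # Calculate unique coverage
--     unique_lines = test_lines - other_lines
--
--     return len(unique_lines)
--
-- def get_tests_with_no_unique_coverage(
--     test_coverage_map: Dict[str, Dict[str, Set[int]]]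
-- ) -> List[str]:
--     """
--     Get list of tests with zero unique coverage.
--
--     Args:
--         test_coverage_map: Dictionary mapping test names to their coverage data
--
--     Returns:
--         List of test names with no unique coverage
--
--     Requirements: 5.4
--     """
--     tests_without_unique_coverage = []
--
--     for test_name in test_coverage_map.keys():
--         unique_lines = _calculate_unique_coverage(test_name, test_coverage_map)
--
--         if unique_lines == 0:
--             tests_without_unique_coverage.append(test_name)
--
--     return tests_without_unique_coverage
-- ===== SOURCE B (Python) =====
-- def get_tests_with_no_unique_coverage(test_coverage_map):
--     # One pass: per-test line-key sets, then a global counter of how many tests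
--     # cover each line; a test has unique coverage iff one of its lines has count 1.
--     line_sets = {}
--     for test_name, coverage in test_coverage_map.items():
--         s = set()
--         for file_path, lines in coverage.items():
--             for line_num in lines:
--                 s.add(f"{file_path}:{line_num}")
--         line_sets[test_name] = s
--     counts = {}
--     for s in line_sets.values():
--         for key in s:
--             counts[key] = counts.get(key, 0) + 1
--     return [t for t, s in line_sets.items() if all(counts[k] > 1 for k in s)]
-- ===== Notes on version B (the rewrite author's own statement) =====
-- stated objective: faster
-- what changed: Instead of recomputing the union of all other tests' covered lines for every test (quadratic), B builds each test's line-key set once and a single counter of covering tests per line; a test is kept iff none of its lines has count 1.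
import Mathlib
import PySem

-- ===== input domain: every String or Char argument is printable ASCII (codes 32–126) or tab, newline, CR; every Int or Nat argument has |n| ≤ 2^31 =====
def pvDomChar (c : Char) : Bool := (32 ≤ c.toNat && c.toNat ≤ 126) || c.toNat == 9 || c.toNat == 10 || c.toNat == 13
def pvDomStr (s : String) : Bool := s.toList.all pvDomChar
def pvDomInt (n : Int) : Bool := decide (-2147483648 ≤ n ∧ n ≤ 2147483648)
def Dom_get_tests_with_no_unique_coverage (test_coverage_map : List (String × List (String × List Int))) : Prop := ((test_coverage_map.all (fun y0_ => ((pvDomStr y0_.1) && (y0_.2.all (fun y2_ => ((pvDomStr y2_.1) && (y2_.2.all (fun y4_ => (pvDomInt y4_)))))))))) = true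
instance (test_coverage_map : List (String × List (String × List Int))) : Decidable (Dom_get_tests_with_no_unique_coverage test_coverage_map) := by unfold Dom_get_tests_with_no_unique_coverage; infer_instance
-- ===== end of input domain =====

-- B replaces A's per-test rescan of all other tests' lines by one global per-line
-- covering-test counter: asymptotically faster, same return value.


-- ===== PORT A =====
-- f"{file_path}:{line_num}"
def pvKey (f : String) (n : Int) : String := PySem.Str.join "" [f, ":", PySem.Int.toStr n]

-- the dict[str, dict[str, set[int]]] argument, decoded with Python dict/set semantics
def pvToDict (m : List (String × List (String × List Int))) :
    PySem.Dict String (PySem.Dict String (PySem.Set Int)) :=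
  PySem.Dict.ofList (m.map (fun p =>
    (p.1, PySem.Dict.ofList (p.2.map (fun q => (q.1, PySem.Set.ofList q.2))))))

-- 'for file_path, lines in coverage.items(): for line_num in lines: acc.add(f"{file_path}:{line_num}")'
def pvAddLines (acc : PySem.Set String) (its : List (String × PySem.Set Int)) : PySem.Set String :=
  its.foldl (fun s q => q.2.foldl (fun s n => PySem.Set.add s (pvKey q.1 n)) s) acc

def pvCalcUnique (test_name : String)
    (d : PySem.Dict String (PySem.Dict String (PySem.Set Int))) : Int :=
  if d.contains test_name = false then 0
  else
    let test_coverage := d.getD test_name PySem.Dict.empty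
    let testLines := pvAddLines PySem.Set.empty test_coverage.items
    let otherLines := d.items.foldl
      (fun acc p => if p.1 ≠ test_name then pvAddLines acc p.2.items else acc) PySem.Set.empty
    ((PySem.Set.diff testLines otherLines).length : Int)

def get_tests_with_no_unique_coverage (test_coverage_map : List (String × List (String × List Int))) : List String :=
  let d := pvToDict test_coverage_map
  d.keys.foldl (fun acc t => if pvCalcUnique t d = 0 then acc ++ [t] else acc) []

-- ===== PORT B =====
def get_tests_with_no_unique_coverage_alt (test_coverage_map : List (String × List (String × List Int))) : List String :=
  let d := pvToDict test_coverage_map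
  let lineSets := d.items.map (fun p => (p.1, pvAddLines PySem.Set.empty p.2.items))
  let counts := lineSets.foldl
    (fun c p => p.2.foldl (fun c k => c.modify k 0 (· + 1)) c)
    (PySem.Dict.empty : PySem.Dict String Int)
  lineSets.foldl
    (fun acc p => if p.2.all (fun k => 1 < counts.getD k 0) then acc ++ [p.1] else acc) []

-- ===== PRECONDITION & SPEC =====
def Spec_get_tests_with_no_unique_coverage (test_coverage_map : List (String × List (String × List Int))) (out : List String) : Prop := out = get_tests_with_no_unique_coverage_alt test_coverage_map
instance (test_coverage_map : List (String × List (String × List Int))) (out : List String) : Decidable (Spec_get_tests_with_no_unique_coverage test_coverage_map out) := by unfold Spec_get_tests_with_no_unique_coverage; infer_instance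

-- ===== CLAIM (what is proved, stated in full; the proofs are below) =====
def Claim_equal_get_tests_with_no_unique_coverage : Prop := ∀ (test_coverage_map : List (String × List (String × List Int))), Dom_get_tests_with_no_unique_coverage test_coverage_map → Spec_get_tests_with_no_unique_coverage test_coverage_map (get_tests_with_no_unique_coverage test_coverage_map)

-- ===== LEMMAS AND PROOFS =====

theorem mem_pvAddLines (y : String) (acc : PySem.Set String) (its : List (String × PySem.Set Int)) :
    y ∈ pvAddLines acc its ↔ y ∈ acc ∨ ∃ q ∈ its, ∃ n ∈ q.2, y = pvKey q.1 n := by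
  induction its generalizing acc with
  | nil => simp [pvAddLines]
  | cons q its ih =>
    show y ∈ pvAddLines (q.2.foldl (fun s n => PySem.Set.add s (pvKey q.1 n)) acc) its ↔ _
    rw [ih, PySem.Set.mem_foldl_add]
    constructor
    · rintro ((h | ⟨n, hn, rfl⟩) | ⟨r, hr, h⟩)
      · exact Or.inl h
      · exact Or.inr ⟨q, List.mem_cons_self, n, hn, rfl⟩
      · exact Or.inr ⟨r, List.mem_cons_of_mem _ hr, h⟩
    · rintro (h | ⟨r, hr, hrest⟩)
      · exact Or.inl (Or.inl h)
      · rcases List.mem_cons.mp hr with rfl | hr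
        · obtain ⟨n, hn, rfl⟩ := hrest; exact Or.inl (Or.inr ⟨n, hn, rfl⟩)
        · exact Or.inr ⟨r, hr, hrest⟩

theorem nodup_pvAddLines (acc : PySem.Set String) (its : List (String × PySem.Set Int))
    (h : acc.Nodup) : (pvAddLines acc its).Nodup := by
  induction its generalizing acc with
  | nil => simpa [pvAddLines] using h
  | cons q its ih =>
    show (pvAddLines (q.2.foldl (fun s n => PySem.Set.add s (pvKey q.1 n)) acc) its).Nodup
    refine ih _ ?_
    rw [← PySem.Set.update_map_eq_foldl_add]
    exact PySem.Set.nodup_update _ _ h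

theorem mem_pvAddLines_empty (y : String) (its : List (String × PySem.Set Int)) :
    y ∈ pvAddLines PySem.Set.empty its ↔ ∃ q ∈ its, ∃ n ∈ q.2, y = pvKey q.1 n := by
  rw [mem_pvAddLines]; simp [PySem.Set.empty]

theorem mem_pvAddLines_split (y : String) (acc : PySem.Set String)
    (its : List (String × PySem.Set Int)) :
    y ∈ pvAddLines acc its ↔ y ∈ acc ∨ y ∈ pvAddLines PySem.Set.empty its := by
  rw [mem_pvAddLines, mem_pvAddLines_empty]

theorem mem_pvOther (y t : String) (acc : PySem.Set String)
    (its : List (String × PySem.Dict String (PySem.Set Int))) :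
    y ∈ its.foldl (fun acc p => if p.1 ≠ t then pvAddLines acc p.2.items else acc) acc ↔
      y ∈ acc ∨ ∃ p ∈ its, p.1 ≠ t ∧ y ∈ pvAddLines PySem.Set.empty p.2.items := by
  induction its generalizing acc with
  | nil => simp
  | cons p its ih =>
    simp only [List.foldl_cons]
    by_cases hp : p.1 = t
    · simp only [hp, ne_eq, not_true_eq_false, if_false, ih]
      constructor
      · rintro (h | ⟨r, hr, h⟩)
        · exact Or.inl h
        · exact Or.inr ⟨r, List.mem_cons_of_mem _ hr, h⟩
      · rintro (h | ⟨r, hr, hne, h⟩)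
        · exact Or.inl h
        · rcases List.mem_cons.mp hr with rfl | hr
          · exact absurd hp hne
          · exact Or.inr ⟨r, hr, hne, h⟩
    · simp only [hp, ne_eq, not_false_eq_true, if_true, ih]
      rw [mem_pvAddLines_split]
      constructor
      · rintro ((h | h) | ⟨r, hr, h⟩)
        · exact Or.inl h
        · exact Or.inr ⟨p, List.mem_cons_self, hp, h⟩
        · exact Or.inr ⟨r, List.mem_cons_of_mem _ hr, h⟩
      · rintro (h | ⟨r, hr, hne, h⟩)
        · exact Or.inl (Or.inl h)
        · rcases List.mem_cons.mp hr with rfl | hr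
          · exact Or.inl (Or.inr h)
          · exact Or.inr ⟨r, hr, hne, h⟩

theorem counts_inner (s : PySem.Set String) (hs : s.Nodup) (c : PySem.Dict String Int) (k : String) :
    (s.foldl (fun c k' => c.modify k' 0 (· + 1)) c).getD k 0 =
      c.getD k 0 + (if k ∈ s then 1 else 0) := by
  induction s generalizing c with
  | nil => simp
  | cons x s ih =>
    rcases List.nodup_cons.mp hs with ⟨hx, hs'⟩
    rw [List.foldl_cons, ih hs', PySem.Dict.getD_modify]
    by_cases hk : k = x
    · subst hk; simp [hx]
    · simp [hk, List.mem_cons]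

theorem counts_spec (l : List (String × PySem.Set String)) (hl : ∀ q ∈ l, q.2.Nodup)
    (c : PySem.Dict String Int) (k : String) :
    (l.foldl (fun c p => p.2.foldl (fun c k => c.modify k 0 (· + 1)) c) c).getD k 0 =
      c.getD k 0 + (l.countP (fun q => decide (k ∈ q.2)) : Int) := by
  induction l generalizing c with
  | nil => simp
  | cons p l ih =>
    simp only [List.foldl_cons, List.countP_cons]
    rw [ih (fun q hq => hl q (List.mem_cons_of_mem _ hq)),
        counts_inner p.2 (hl p List.mem_cons_self)]
    by_cases hk : k ∈ p.2
    · simp [hk]; ring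
    · simp [hk]

theorem two_le_countP (l : List (String × PySem.Set String)) (t : String) (s : PySem.Set String)
    (k : String) (hn : (l.map Prod.fst).Nodup) (hts : (t, s) ∈ l) (hk : k ∈ s) :
    2 ≤ l.countP (fun q => decide (k ∈ q.2)) ↔ ∃ q ∈ l, q.1 ≠ t ∧ k ∈ q.2 := by
  induction l with
  | nil => cases hts
  | cons a l ih =>
    rcases List.nodup_cons.mp hn with ⟨ha, hn'⟩
    rcases List.mem_cons.mp hts with rfl | hts
    · -- head is (t, s)
      have hrest : ∀ q ∈ l, q.1 ≠ t := by
        intro q hq h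
        exact ha (h ▸ (List.mem_map_of_mem hq : q.1 ∈ l.map Prod.fst))
      rw [List.countP_cons]
      simp only [hk, decide_true, if_pos]
      constructor
      · intro h
        have : 0 < l.countP (fun q => decide (k ∈ q.2)) := by omega
        obtain ⟨q, hq, hq2⟩ := List.countP_pos_iff.mp this
        exact ⟨q, List.mem_cons_of_mem _ hq, hrest q hq, of_decide_eq_true hq2⟩
      · rintro ⟨q, hq, hne, hkq⟩
        rcases List.mem_cons.mp hq with rfl | hq
        · exact absurd rfl hne
        · have : 0 < l.countP (fun q => decide (k ∈ q.2)) :=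
            List.countP_pos_iff.mpr ⟨q, hq, decide_eq_true hkq⟩
          omega
    · -- (t, s) in tail, so a.1 ≠ t
      have hat : a.1 ≠ t := by
        intro h
        exact ha (h ▸ (List.mem_map_of_mem hts : (t, s).1 ∈ l.map Prod.fst))
      rw [List.countP_cons]
      by_cases hka : k ∈ a.2
      · simp only [hka, decide_true, if_pos]
        have h1 : 0 < l.countP (fun q => decide (k ∈ q.2)) :=
          List.countP_pos_iff.mpr ⟨(t, s), hts, decide_eq_true hk⟩
        constructor
        · intro _; exact ⟨a, List.mem_cons_self, hat, hka⟩
        · intro _; omega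
      · simp only [hka, decide_false, Bool.false_eq_true, if_false, Nat.add_zero]
        rw [ih hn' hts]
        constructor
        · rintro ⟨q, hq, h⟩; exact ⟨q, List.mem_cons_of_mem _ hq, h⟩
        · rintro ⟨q, hq, hne, hkq⟩
          rcases List.mem_cons.mp hq with rfl | hq
          · exact absurd hkq hka
          · exact ⟨q, hq, hne, hkq⟩

theorem cond_eq (d : PySem.Dict String (PySem.Dict String (PySem.Set Int)))
    (hkeys : d.keys.Nodup) (p : String × PySem.Dict String (PySem.Set Int)) (hp : p ∈ d.items) :
    pvCalcUnique p.1 d = 0 ↔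
      ((pvAddLines PySem.Set.empty p.2.items).all (fun k =>
        1 < ((d.items.map (fun r => (r.1, pvAddLines PySem.Set.empty r.2.items))).foldl
          (fun c q => q.2.foldl (fun c k => c.modify k 0 (· + 1)) c)
          (PySem.Dict.empty : PySem.Dict String Int)).getD k 0) = true) := by
  obtain ⟨t, cov⟩ := p
  have hmemk : t ∈ d.keys := by
    have h1 : ((t, cov)).1 ∈ d.items.map Prod.fst := List.mem_map_of_mem hp
    exact h1
  have hcontains : d.contains t = true := (PySem.Dict.contains_iff_mem_keys d t).mpr hmemk
  have hgetD : d.getD t PySem.Dict.empty = cov :=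
    PySem.Dict.getD_of_mem_items d hp hkeys PySem.Dict.empty
  have hnodupsets : ∀ q ∈ d.items.map (fun r => (r.1, pvAddLines PySem.Set.empty r.2.items)),
      q.2.Nodup := by
    rintro q hq
    obtain ⟨r, _, rfl⟩ := List.mem_map.mp hq
    exact nodup_pvAddLines _ _ List.nodup_nil
  have hmapfst : (d.items.map (fun r => (r.1, pvAddLines PySem.Set.empty r.2.items))).map Prod.fst
      = d.keys := by rw [List.map_map]; rfl
  constructor
  · intro hA
    rw [List.all_eq_true]
    intro k hkmem
    have hk : k ∈ pvAddLines PySem.Set.empty cov.items := hkmem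
    -- from hA: every line of this test is covered elsewhere
    have hsub : ∀ y ∈ pvAddLines PySem.Set.empty cov.items,
        ∃ r ∈ d.items, r.1 ≠ t ∧ y ∈ pvAddLines PySem.Set.empty r.2.items := by
      intro y hy
      simp only [pvCalcUnique, hcontains, Bool.true_eq_false, if_false, hgetD,
        Nat.cast_eq_zero, List.length_eq_zero_iff] at hA
      have := List.eq_nil_iff_forall_not_mem.mp hA y
      rw [PySem.Set.mem_diff] at this
      have hyO : y ∈ d.items.foldl
          (fun acc p => if p.1 ≠ t then pvAddLines acc p.2.items else acc) PySem.Set.empty := by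
        by_contra hno
        exact this ⟨hy, hno⟩
      rcases (mem_pvOther y t PySem.Set.empty d.items).mp hyO with h | h
      · cases h
      · exact h
    obtain ⟨r, hr, hrt, hkr⟩ := hsub k hk
    rw [counts_spec _ hnodupsets, PySem.Dict.getD_empty]
    have h2 : 2 ≤ (d.items.map (fun r => (r.1, pvAddLines PySem.Set.empty r.2.items))).countP
        (fun q => decide (k ∈ q.2)) := by
      rw [two_le_countP _ t (pvAddLines PySem.Set.empty cov.items) k (hmapfst ▸ hkeys)
        (List.mem_map_of_mem (f := fun r => (r.1, pvAddLines PySem.Set.empty r.2.items)) hp) hk]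
      exact ⟨(r.1, pvAddLines PySem.Set.empty r.2.items),
        List.mem_map_of_mem (f := fun r => (r.1, pvAddLines PySem.Set.empty r.2.items)) hr, hrt, hkr⟩
    simp only [decide_eq_true_eq]
    omega
  · intro hB
    simp only [pvCalcUnique, hcontains, Bool.true_eq_false, if_false, hgetD,
      Nat.cast_eq_zero, List.length_eq_zero_iff]
    rw [List.eq_nil_iff_forall_not_mem]
    intro y hy
    rw [PySem.Set.mem_diff] at hy
    obtain ⟨hyL, hyO⟩ := hy
    apply hyO
    rw [mem_pvOther]
    right
    -- from hB: the counter value at y is ≥ 2, so some other test covers y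
    have := List.all_eq_true.mp hB y hyL
    rw [counts_spec _ hnodupsets, PySem.Dict.getD_empty, decide_eq_true_eq] at this
    have h2 : 2 ≤ (d.items.map (fun r => (r.1, pvAddLines PySem.Set.empty r.2.items))).countP
        (fun q => decide (y ∈ q.2)) := by omega
    rw [two_le_countP _ t (pvAddLines PySem.Set.empty cov.items) y (hmapfst ▸ hkeys)
      (List.mem_map_of_mem (f := fun r => (r.1, pvAddLines PySem.Set.empty r.2.items)) hp) hyL] at h2
    obtain ⟨q, hq, hqt, hyq⟩ := h2
    obtain ⟨r, hr, rfl⟩ := List.mem_map.mp hq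
    exact ⟨r, hr, hqt, hyq⟩

theorem get_tests_with_no_unique_coverage_spec_aux (m : List (String × List (String × List Int))) :
    get_tests_with_no_unique_coverage m = get_tests_with_no_unique_coverage_alt m := by
  simp only [get_tests_with_no_unique_coverage, get_tests_with_no_unique_coverage_alt]
  have hkeys : (pvToDict m).keys.Nodup := PySem.Dict.nodup_keys_ofList _
  rw [PySem.List.foldl_append_ite_eq_filter (fun t => pvCalcUnique t (pvToDict m) = 0),
    PySem.List.foldl_append_if _ Prod.fst, List.nil_append, List.nil_append,
    show (pvToDict m).keys = (pvToDict m).items.map Prod.fst from rfl,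
    List.filter_map, List.filter_map, List.map_map]
  have hfun : (Prod.fst ∘ fun r => (r.1, pvAddLines PySem.Set.empty r.2.items)) =
      (Prod.fst : (String × PySem.Dict String (PySem.Set Int)) → String) := rfl
  rw [hfun]
  congr 1
  apply List.filter_congr
  intro p hp
  simp only [Function.comp]
  have h := cond_eq (pvToDict m) hkeys p hp
  rw [Bool.eq_iff_iff, decide_eq_true_eq]
  exact h
-- ===== VERDICT (by name: the statement is the Claim_ definition above) =====
theorem get_tests_with_no_unique_coverage_spec : Claim_equal_get_tests_with_no_unique_coverage := by
  intro m _
  show _ = _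
  exact get_tests_with_no_unique_coverage_spec_aux m
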